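-- pv_equiv track=rewrite | github.com/matthewc423/CS124 | CS 124/Prog2/strassen.py | oddshelper
-- ===== SOURCE A (Python) =====
-- def evenshelper(evens):
--   newevens = []
--
--   for even in evens:
--     if even * 2 < 258:
--       newevens.append(even * 2)
--       newevens.append(even * 2 - 1)
--
--   if newevens == []:
--     return newevens
--   return evens + evenshelper(newevens)
--
-- def oddshelper(odds):
--   newodds = []
--   for odd in odds:
--     if odd * 2 < 258:
--       newodds.append(odd * 2)
--       newodds.append(odd * 2 - 1)
--
--   if newodds == []:
--     return newodds
--   return odds + evenshelper(newodds)
-- ===== SOURCE B (Python) =====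
-- def oddshelper(odds):
--     result = []
--     current = odds
--     while True:
--         nxt = []
--         for x in current:
--             if x * 2 < 258:
--                 nxt.append(x * 2)
--                 nxt.append(x * 2 - 1)
--         if not nxt:
--             return result
--         result += current
--         current = nxt
-- ===== Notes on version B (the rewrite author's own statement) =====
-- stated objective: simpler
-- what changed: Replaced the pair of near-identical linearly recursive functions (oddshelper delegating to evenshelper, each rebuilding the suffix by repeated list concatenation) with a single iterative loop over levels that keeps an accumulator and the current level, breaking before appending when the next level is empty.
import Mathlib
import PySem

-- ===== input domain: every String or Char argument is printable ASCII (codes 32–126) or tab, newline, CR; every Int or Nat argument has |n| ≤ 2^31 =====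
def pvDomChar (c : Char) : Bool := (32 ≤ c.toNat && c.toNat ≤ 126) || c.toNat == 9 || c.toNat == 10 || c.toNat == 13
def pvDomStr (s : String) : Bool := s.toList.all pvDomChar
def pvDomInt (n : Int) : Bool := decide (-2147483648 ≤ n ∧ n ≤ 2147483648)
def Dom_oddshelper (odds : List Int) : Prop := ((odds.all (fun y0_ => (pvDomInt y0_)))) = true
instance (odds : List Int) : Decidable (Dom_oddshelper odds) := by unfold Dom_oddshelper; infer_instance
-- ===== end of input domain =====

-- B replaces A's pair of near-identical linearly recursive helpers with one
-- iterative accumulator loop over the levels (simpler; return value only).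

-- ===== PORT A =====
-- Python's unbounded recursion is made total with a fuel guard; under
-- Pre_oddshelper (all elements ≥ 2) every level's minimum at least doubles,
-- so depth < 64 and the fuel is never exhausted.
def evenshelper (fuel : Nat) (evens : List Int) : List Int :=
  match fuel with
  | 0 => []
  | fuel + 1 =>
    let newevens := evens.foldl
      (fun acc even => if even * 2 < 258 then acc ++ [even * 2, even * 2 - 1] else acc) []
    if newevens = [] then newevens
    else evens ++ evenshelper fuel newevens

def oddshelper (odds : List Int) : List Int :=
  let newodds := odds.foldl
    (fun acc odd => if odd * 2 < 258 then acc ++ [odd * 2, odd * 2 - 1] else acc) []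
  if newodds = [] then newodds
  else odds ++ evenshelper 64 newodds

-- ===== PORT B =====
-- Source B's `while True` loop, fueled the same way (never exhausted under Pre_).
def oddLoop (fuel : Nat) (result current : List Int) : List Int :=
  match fuel with
  | 0 => result
  | fuel + 1 =>
    let nxt := current.foldl
      (fun acc x => if x * 2 < 258 then acc ++ [x * 2, x * 2 - 1] else acc) []
    if nxt = [] then result
    else oddLoop fuel (result ++ current) nxt

def oddshelper_alt (odds : List Int) : List Int := oddLoop 65 [] odds

-- ===== PRECONDITION & SPEC =====
-- Pre_ excludes lists containing an element ≤ 1: on those the doubling never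
-- leaves the `*2 < 258` guard, so Python A (and Python B) recurse/loop forever
-- (RecursionError / divergence) instead of returning.
def Pre_oddshelper (odds : List Int) : Prop := ∀ x ∈ odds, 2 ≤ x
instance (odds : List Int) : Decidable (Pre_oddshelper odds) := by unfold Pre_oddshelper; infer_instance
def pvWitness_oddshelper : List Int := [5, 200]

def Spec_oddshelper (odds : List Int) (out : List Int) : Prop := out = oddshelper_alt odds
instance (odds : List Int) (out : List Int) : Decidable (Spec_oddshelper odds out) := by unfold Spec_oddshelper; infer_instance

-- ===== CLAIM (what is proved, stated in full; the proofs are below) =====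
def Claim_equal_oddshelper : Prop := ∀ (odds : List Int), Dom_oddshelper odds → Pre_oddshelper odds → Spec_oddshelper odds (oddshelper odds)

-- ===== LEMMAS AND PROOFS =====
-- B's accumulator loop equals A's recursion with the accumulator pulled out front.
theorem oddLoop_eq_evenshelper (n : Nat) :
    ∀ (acc cur : List Int), oddLoop n acc cur = acc ++ evenshelper n cur := by
  induction n with
  | zero => intro acc cur; simp [oddLoop, evenshelper]
  | succ n ih =>
    intro acc cur
    simp only [oddLoop, evenshelper]
    by_cases h : cur.foldl
        (fun acc x => if x * 2 < 258 then acc ++ [x * 2, x * 2 - 1] else acc) [] = []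
    · simp [h]
    · simp [h, ih, List.append_assoc]

-- ===== VERDICT (by name: the statement is the Claim_ definition above) =====
theorem oddshelper_spec : Claim_equal_oddshelper := by
  intro odds _ _
  show oddshelper odds = oddshelper_alt odds
  rw [oddshelper_alt, oddLoop_eq_evenshelper, List.nil_append,
      show (65 : Nat) = 64 + 1 from rfl, evenshelper]
  rfl
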